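-- pv_equiv track=rewrite | github.com/Sankari-K/advent-of-code-2023 | day 14/better_parabolic_reflector_dish.py | get_platform
-- ===== SOURCE A (Python) =====
-- from copy import deepcopy
--
-- def tilt(platform):
--     for col in range(len(platform[0])):
--         for row in range(len(platform)):
--             if platform[row][col] == "O":
--                 current_index = row
--                 while current_index > 0 and platform[current_index - 1][col] == ".":
--                     current_index -= 1
--                 platform[current_index][col], platform[row][col] = platform[row][col], platform[current_index][col]
--     return platform
--
-- def rotate(platform):
--     return list(map(list, zip(*platform[::-1])))
--
-- def perform_cycle(platform):
--     platform = tilt(platform)  # north tilt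
--     platform = tilt(rotate(platform)) # west tilt
--     platform = (tilt(rotate(platform))) # south tilt
--     platform = rotate(tilt(rotate(platform))) # east tilt
--     return platform
--
-- def get_platform(platform, cycles):
--     platforms = list()
--     while platform not in platforms:
--         platforms.append(deepcopy(platform))
--         platform = perform_cycle(platform)
--
--     indices = [i for i in range(len(platforms))]
--     while indices.count(indices[-1]) != 3:
--         indices.append(platforms.index(platform))
--         platform = perform_cycle(platform)
--
--     indices = indices[:-1]
--     repeated_length = len(indices) - len(platforms)
--     base_length = len(platforms) - repeated_length
--
--     return platforms[(cycles - base_length) % repeated_length + base_length]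
-- ===== SOURCE B (Python) =====
-- from copy import deepcopy
--
-- def tilt(platform):
--     for col in range(len(platform[0])):
--         for row in range(len(platform)):
--             if platform[row][col] == "O":
--                 current_index = row
--                 while current_index > 0 and platform[current_index - 1][col] == ".":
--                     current_index -= 1
--                 platform[current_index][col], platform[row][col] = platform[row][col], platform[current_index][col]
--     return platform
--
-- def rotate(platform):
--     return list(map(list, zip(*platform[::-1])))
--
-- def perform_cycle(platform):
--     platform = tilt(platform)  # north tilt
--     platform = tilt(rotate(platform))  # west tilt
--     platform = (tilt(rotate(platform)))  # south tilt
--     platform = rotate(tilt(rotate(platform)))  # east tilt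
--     return platform
--
-- def get_platform(platform, cycles):
--     # One pass: remember the first step each state was seen at; derive base and
--     # cycle length directly instead of A's second index-counting loop.
--     seen = {}
--     snaps = []
--     step = 0
--     while True:
--         key = tuple(map(tuple, platform))
--         if key in seen:
--             base = seen[key]
--             cycle_len = step - base
--             return snaps[base + (cycles - base) % cycle_len]
--         seen[key] = step
--         snaps.append(deepcopy(platform))
--         step += 1
--         platform = perform_cycle(platform)
-- ===== Notes on version B (the rewrite author's own statement) =====
-- stated objective: simpler
-- what changed: B replaces A's two-loop scheme (repeat-until-seen list scan, then a second index-counting loop that re-runs perform_cycle to recover base and cycle length) with a single pass that records each state's first step in a dict and derives base and cycle length directly from the first repeat.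
import Mathlib
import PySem

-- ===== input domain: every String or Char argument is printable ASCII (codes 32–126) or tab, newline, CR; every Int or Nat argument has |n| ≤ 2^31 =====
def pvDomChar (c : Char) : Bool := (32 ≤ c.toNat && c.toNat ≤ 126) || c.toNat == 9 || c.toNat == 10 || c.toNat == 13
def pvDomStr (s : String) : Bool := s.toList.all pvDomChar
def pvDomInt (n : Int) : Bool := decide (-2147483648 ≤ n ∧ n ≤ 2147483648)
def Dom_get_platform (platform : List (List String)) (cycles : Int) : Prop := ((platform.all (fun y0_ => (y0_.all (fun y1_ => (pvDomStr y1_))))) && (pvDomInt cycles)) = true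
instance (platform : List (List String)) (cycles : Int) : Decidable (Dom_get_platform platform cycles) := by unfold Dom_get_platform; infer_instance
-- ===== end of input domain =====

-- B replaces A's two cycle-detection loops by one dict-recording pass (same helpers, same
-- return value); both Pythons mutate the argument identically in place — the equivalence
-- proved here is about the return value.

-- ===== PORT A =====
-- shared module helpers (tilt / rotate / perform_cycle are the same Python code in Source A and Source B)

-- platform[r][c] (in range whenever the Python does not raise; default never observed under Pre_)
def pvGetCell (p : List (List String)) (r c : Nat) : String := (p.getD r []).getD c ""

-- platform[r][c] = v
def pvSetCell (p : List (List String)) (r c : Nat) (v : String) : List (List String) :=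
  p.set r ((p.getD r []).set c v)

-- the `while current_index > 0 and platform[current_index - 1][col] == "."` descent
def pvFall (p : List (List String)) (c : Nat) : Nat → Nat
  | 0 => 0
  | ci + 1 => if pvGetCell p ci c = "." then pvFall p c ci else ci + 1

def pvTilt (p : List (List String)) : List (List String) :=
  (List.range (p.headD []).length).foldl (fun q c =>
    (List.range q.length).foldl (fun q r =>
      if pvGetCell q r c = "O" then
        let ci := pvFall q c r
        -- simultaneous swap: both RHS values read before writing
        pvSetCell (pvSetCell q ci c (pvGetCell q r c)) r c (pvGetCell q ci c)
      else q) q) p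

-- length of zip(*rows) = minimum row length (0 for no rows)
def pvMinRow (p : List (List String)) : Nat :=
  match p with
  | [] => 0
  | r :: rs => rs.foldl (fun a row => min a row.length) r.length

-- list(map(list, zip(*platform[::-1]))) : c-th output row collects entry c of each reversed row
def pvRotate (p : List (List String)) : List (List String) :=
  (List.range (pvMinRow p)).map (fun c => p.reverse.map (fun row => row.getD c ""))

def pvCycle (p : List (List String)) : List (List String) :=
  pvRotate (pvTilt (pvRotate (pvTilt (pvRotate (pvTilt (pvRotate (pvTilt p)))))))

-- totality fuel for the while-loops: strictly more than the number of reachable states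
def pvFuel (platform : List (List String)) : Nat :=
  (("" :: platform.flatten).length ^ (platform.headD []).length) ^ platform.length + 3

-- `while platform not in platforms: platforms.append(deepcopy(platform)); platform = perform_cycle(platform)`
def pvLoop1 : Nat → List (List (List String)) → List (List String) →
    (List (List (List String)) × List (List String))
  | 0, ps, s => (ps, s)
  | f + 1, ps, s => if s ∈ ps then (ps, s) else pvLoop1 f (ps ++ [s]) (pvCycle s)

-- `while indices.count(indices[-1]) != 3: indices.append(platforms.index(platform)); platform = perform_cycle(platform)`
-- indices is nonempty and platform ∈ platforms throughout, so the defaults are never observed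
def pvLoop2 : Nat → List (List (List String)) → List Int → List (List String) → List Int
  | 0, _, idxs, _ => idxs
  | f + 1, ps, idxs, s =>
    if PySem.List.count idxs (idxs.getLastD 0) ≠ 3 then
      pvLoop2 f ps (idxs ++ [(((PySem.List.index? ps s).getD 0 : Nat) : Int)]) (pvCycle s)
    else idxs

def get_platform (platform : List (List String)) (cycles : Int) : List (List String) :=
  let r := pvLoop1 (pvFuel platform) [] platform
  let idxs0 : List Int := (List.range r.1.length).map (fun i : Nat => (i : Int))
  let idxs := PySem.List.slice (pvLoop2 (pvFuel platform) r.1 idxs0 r.2) none (some (-1))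
  let repeated : Int := (idxs.length : Int) - (r.1.length : Int)
  let blen : Int := (r.1.length : Int) - repeated
  -- platforms[(cycles - base_length) % repeated_length + base_length]; index provably in range
  (PySem.List.pyGet? r.1 (PySem.Int.mod (cycles - blen) repeated + blen)).getD []

-- ===== PORT B =====
-- single pass: dict `seen` state ↦ first step, parallel snapshot list, derive base and cycle length
def pvLoopB (cycles : Int) : Nat → PySem.Dict (List (List String)) Int →
    List (List (List String)) → Int → List (List String) → List (List String)
  | 0, _, _, _, _ => []      -- fuel exhausted: unreachable for pvFuel
  | f + 1, seen, snaps, step, s =>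
    match seen.get? s with
    | some base =>
        (PySem.List.pyGet? snaps (base + PySem.Int.mod (cycles - base) (step - base))).getD []
    | none => pvLoopB cycles f (seen.insert s step) (snaps ++ [s]) (step + 1) (pvCycle s)

def get_platform_alt (platform : List (List String)) (cycles : Int) : List (List String) :=
  pvLoopB cycles (pvFuel platform) PySem.Dict.empty [] 0 platform

-- ===== PRECONDITION & SPEC =====
-- Pre_ excludes exactly the inputs on which A raises IndexError: an empty platform, an empty
-- first row, or some row shorter than the first row (tilt then reads past that row's end).
def Pre_get_platform (platform : List (List String)) (cycles : Int) : Prop :=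
  0 < platform.length ∧ 0 < (platform.headD []).length ∧
    ∀ row ∈ platform, (platform.headD []).length ≤ row.length

instance (platform : List (List String)) (cycles : Int) :
    Decidable (Pre_get_platform platform cycles) := by unfold Pre_get_platform; infer_instance

def pvWitness_get_platform : List (List String) × Int := ([["O", "."], [".", "#"]], 5)

def Spec_get_platform (platform : List (List String)) (cycles : Int) (out : List (List String)) : Prop :=
  out = get_platform_alt platform cycles
instance (platform : List (List String)) (cycles : Int) (out : List (List String)) :
    Decidable (Spec_get_platform platform cycles out) := by unfold Spec_get_platform; infer_instance

-- ===== CLAIM (what is proved, stated in full; the proofs are below) =====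
def Claim_equal_get_platform : Prop := ∀ (platform : List (List String)) (cycles : Int), Dom_get_platform platform cycles → Pre_get_platform platform cycles → Spec_get_platform platform cycles (get_platform platform cycles)

-- ===== LEMMAS AND PROOFS =====

-- ---------- generic helpers ----------

theorem pvFoldlInv {α β : Type} (P : β → Prop) (f : β → α → β)
    (hf : ∀ b a, P b → P (f b a)) : ∀ (l : List α) (b : β), P b → P (l.foldl f b) := by
  intro l
  induction l with
  | nil => intro b hb; simpa using hb
  | cons x xs ih => intro b hb; simpa using ih (f b x) (hf b x hb)

-- ---------- shape and entry invariants of the helpers ----------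

theorem pvSetCell_map_length (p : List (List String)) (r c : Nat) (v : String) :
    (pvSetCell p r c v).map List.length = p.map List.length := by
  unfold pvSetCell
  by_cases hr : r < p.length
  · rw [List.map_set, List.length_set, List.getD_eq_getElem p [] hr,
      show p[r].length = (p.map List.length)[r]'(by simpa using hr) by simp,
      List.set_getElem_self]
  · rw [List.set_eq_of_length_le (by simpa using Nat.le_of_not_lt hr)]

theorem pvTilt_map_length (p : List (List String)) :
    (pvTilt p).map List.length = p.map List.length := by
  unfold pvTilt
  refine pvFoldlInv (fun q : List (List String) => q.map List.length = p.map List.length) _ ?_ _ _ rfl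
  intro q c hq
  refine pvFoldlInv (fun q : List (List String) => q.map List.length = p.map List.length) _ ?_ _ _ hq
  intro q r hq2
  by_cases hO : pvGetCell q r c = "O"
  · simp only [hO, if_pos, pvSetCell_map_length]; exact hq2
  · simpa [hO] using hq2

def pvEntP (E : List String) (p : List (List String)) : Prop :=
  ∀ row ∈ p, ∀ x ∈ row, x ∈ E

theorem pvGetD_row_mem {E : List String} {p : List (List String)} (hE : pvEntP E p)
    (h0 : "" ∈ E) (r c : Nat) : (p.getD r []).getD c "" ∈ E := by
  by_cases hr : r < p.length
  · rw [List.getD_eq_getElem p [] hr]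
    by_cases hc : c < p[r].length
    · rw [List.getD_eq_getElem _ "" hc]
      exact hE p[r] (List.getElem_mem hr) _ (List.getElem_mem hc)
    · rw [List.getD_eq_default _ "" (Nat.le_of_not_lt hc)]; exact h0
  · rw [List.getD_eq_default p [] (Nat.le_of_not_lt hr)]
    rw [show ([] : List String).getD c "" = "" from rfl]
    exact h0

theorem pvGetCell_mem {E : List String} {p : List (List String)} (hE : pvEntP E p)
    (h0 : "" ∈ E) (r c : Nat) : pvGetCell p r c ∈ E :=
  pvGetD_row_mem hE h0 r c

theorem pvEntP_setCell {E : List String} {p : List (List String)} {v : String}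
    (hE : pvEntP E p) (hv : v ∈ E) (r c : Nat) : pvEntP E (pvSetCell p r c v) := by
  intro row hrow x hx
  rcases List.mem_or_eq_of_mem_set hrow with h | h
  · exact hE row h x hx
  · subst h
    rcases List.mem_or_eq_of_mem_set hx with h2 | h2
    · by_cases hr : r < p.length
      · rw [List.getD_eq_getElem p [] hr] at h2
        exact hE _ (List.getElem_mem hr) _ h2
      · rw [List.getD_eq_default p [] (Nat.le_of_not_lt hr)] at h2; simp at h2
    · subst h2; exact hv

theorem pvEntP_tilt {E : List String} {p : List (List String)} (hE : pvEntP E p)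
    (h0 : "" ∈ E) : pvEntP E (pvTilt p) := by
  unfold pvTilt
  refine pvFoldlInv (pvEntP E) _ ?_ _ _ hE
  intro q c hq
  refine pvFoldlInv (pvEntP E) _ ?_ _ _ hq
  intro q r hq2
  by_cases hO : pvGetCell q r c = "O"
  · simp only [hO, if_pos]
    have hOmem : pvGetCell q r c ∈ E := pvGetCell_mem hq2 h0 r c
    rw [hO] at hOmem
    have h1 := pvEntP_setCell hq2 hOmem (pvFall q c r) c
    exact pvEntP_setCell h1 (pvGetCell_mem hq2 h0 (pvFall q c r) c) r c
  · simpa [hO] using hq2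

theorem pvEntP_rotate {E : List String} {p : List (List String)} (hE : pvEntP E p)
    (h0 : "" ∈ E) : pvEntP E (pvRotate p) := by
  intro row hrow x hx
  unfold pvRotate at hrow
  rcases List.mem_map.1 hrow with ⟨c, _, rfl⟩
  rcases List.mem_map.1 hx with ⟨row0, hr0, rfl⟩
  have hr0' : row0 ∈ p := List.mem_reverse.1 hr0
  by_cases hc : c < row0.length
  · rw [List.getD_eq_getElem _ "" hc]
    exact hE row0 hr0' _ (List.getElem_mem hc)
  · rw [List.getD_eq_default _ "" (Nat.le_of_not_lt hc)]; exact h0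

theorem pvEntP_cycle {E : List String} {p : List (List String)} (hE : pvEntP E p)
    (h0 : "" ∈ E) : pvEntP E (pvCycle p) := by
  unfold pvCycle
  exact pvEntP_rotate (pvEntP_tilt (pvEntP_rotate (pvEntP_tilt (pvEntP_rotate (pvEntP_tilt
    (pvEntP_rotate (pvEntP_tilt hE h0) h0) h0) h0) h0) h0) h0) h0

-- minimum row length, expressed through the row-length list
def pvMinAux (ns : List Nat) : Nat :=
  match ns with
  | [] => 0
  | n :: t => t.foldl min n

theorem pvMinRow_eq (p : List (List String)) : pvMinRow p = pvMinAux (p.map List.length) := by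
  cases p with
  | nil => rfl
  | cons r rs =>
    show rs.foldl (fun a row => min a row.length) r.length = (rs.map List.length).foldl min r.length
    rw [List.foldl_map]

theorem pvFoldlMin_const (b : Nat) : ∀ (t : List Nat) (a : Nat), (∀ x ∈ t, a ≤ x) →
    t.foldl min a = a := by
  intro t
  induction t with
  | nil => intro a _; rfl
  | cons x xs ih =>
    intro a ha
    have : min a x = a := Nat.min_eq_left (ha x (by simp))
    simp only [List.foldl_cons, this]
    exact ih a (fun y hy => ha y (by simp [hy]))

theorem pvMinAux_replicate (a b : Nat) (ha : 0 < a) : pvMinAux (List.replicate a b) = b := by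
  cases a with
  | zero => omega
  | succ a' =>
    show pvMinAux (b :: List.replicate a' b) = b
    exact pvFoldlMin_const b _ b (fun x hx => Nat.le_of_eq (List.eq_of_mem_replicate hx).symm)

def pvRectP (p : List (List String)) (a b : Nat) : Prop :=
  p.map List.length = List.replicate a b

theorem pvRectP_length {p : List (List String)} {a b : Nat} (h : pvRectP p a b) :
    p.length = a := by
  have := congrArg List.length h
  simpa using this

theorem pvRectP_tilt {p : List (List String)} {a b : Nat} (h : pvRectP p a b) :
    pvRectP (pvTilt p) a b := by
  unfold pvRectP
  rw [pvTilt_map_length]; exact h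

theorem pvRotate_map_length (p : List (List String)) :
    (pvRotate p).map List.length = List.replicate (pvMinRow p) p.length := by
  unfold pvRotate
  rw [List.map_map]
  have : ((fun c => (p.reverse.map (fun row => row.getD c "")).length) : Nat → Nat)
      = fun _ => p.length := by
    funext c; simp
  rw [show (List.length ∘ fun c => p.reverse.map fun row => row.getD c "") =
    (fun _ => p.length) from this]
  simp [List.map_const']

theorem pvRectP_rotate {p : List (List String)} {a b : Nat} (h : pvRectP p a b) (ha : 0 < a) :
    pvRectP (pvRotate p) b a := by
  unfold pvRectP
  rw [pvRotate_map_length, pvRectP_length h, pvMinRow_eq, h, pvMinAux_replicate a b ha]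

theorem pvRectP_rt {p : List (List String)} {a b : Nat} (h : pvRectP p a b) (ha : 0 < a) :
    pvRectP (pvRotate (pvTilt p)) b a :=
  pvRectP_rotate (pvRectP_tilt h) ha

theorem pvRectP_cycle {p : List (List String)} {a b : Nat} (h : pvRectP p a b)
    (ha : 0 < a) (hb : 0 < b) : pvRectP (pvCycle p) a b := by
  unfold pvCycle
  exact pvRectP_rt (pvRectP_rt (pvRectP_rt (pvRectP_rt h ha) hb) ha) hb

-- the first cycle of a (possibly ragged) admissible platform is rectangular
theorem pvCycle_first_rect {s0 : List (List String)} (h1 : 0 < s0.length)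
    (h2 : 0 < (s0.headD []).length)
    (h3 : ∀ row ∈ s0, (s0.headD []).length ≤ row.length) :
    pvRectP (pvCycle s0) s0.length (s0.headD []).length := by
  obtain ⟨r, rs, rfl⟩ : ∃ r rs, s0 = r :: rs := by
    cases s0 with
    | nil => simp at h1
    | cons r rs => exact ⟨r, rs, rfl⟩
  set n0 := ((r :: rs).headD []).length with hn0
  have hmin : pvMinRow (pvTilt (r :: rs)) = n0 := by
    rw [pvMinRow_eq, pvTilt_map_length]
    show pvMinAux (r.length :: rs.map List.length) = n0
    have : r.length = n0 := rfl
    rw [this]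
    exact pvFoldlMin_const n0 _ n0 (by
      intro x hx
      rcases List.mem_map.1 hx with ⟨row, hrow, rfl⟩
      exact h3 row (by simp [hrow]))
  have hfirst : pvRectP (pvRotate (pvTilt (r :: rs))) n0 (r :: rs).length := by
    unfold pvRectP
    rw [pvRotate_map_length, hmin]
    have : (pvTilt (r :: rs)).length = (r :: rs).length := by
      have := congrArg List.length (pvTilt_map_length (r :: rs))
      simpa using this
    rw [this]
  have hm : 0 < (r :: rs).length := h1
  have hn : 0 < n0 := h2
  show pvRectP (pvRotate (pvTilt (pvRotate (pvTilt (pvRotate (pvTilt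
    (pvRotate (pvTilt (r :: rs)))))))))  (r :: rs).length n0
  exact pvRectP_rt (pvRectP_rt (pvRectP_rt hfirst hn) hm) hn

-- ---------- the orbit of perform_cycle ----------

def pvSeq (s0 : List (List String)) : Nat → List (List String)
  | 0 => s0
  | k + 1 => pvCycle (pvSeq s0 k)

def pvPs (s0 : List (List String)) (k : Nat) : List (List (List String)) :=
  (List.range k).map (pvSeq s0)

def pvStops (s0 : List (List String)) (k : Nat) : Prop := pvSeq s0 k ∈ pvPs s0 k

def pvStopsDec (s0 : List (List String)) (k : Nat) : Decidable (pvStops s0 k) := by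
  unfold pvStops; infer_instance

theorem pvPs_succ (s0 : List (List String)) (k : Nat) :
    pvPs s0 (k + 1) = pvPs s0 k ++ [pvSeq s0 k] := by
  unfold pvPs; rw [List.range_succ, List.map_append]; rfl

theorem pvPs_length (s0 : List (List String)) (k : Nat) : (pvPs s0 k).length = k := by
  simp [pvPs]

theorem pvPs_nodup (s0 : List (List String)) :
    ∀ k, (∀ j < k, ¬ pvStops s0 j) → (pvPs s0 k).Nodup := by
  intro k
  induction k with
  | zero => intro _; simp [pvPs]
  | succ k ih =>
    intro h
    rw [pvPs_succ]
    have h1 : (pvPs s0 k).Nodup := ih (fun j hj => h j (by omega))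
    have h2 : pvSeq s0 k ∉ pvPs s0 k := h k (by omega)
    rw [List.nodup_append]
    refine ⟨h1, by simp, ?_⟩
    intro a ha b hb
    rw [List.mem_singleton] at hb
    subst hb
    exact fun hab => h2 (hab ▸ ha)

-- ---------- enumeration of all possible states (for termination) ----------

def pvAll {α : Type} : Nat → List α → List (List α)
  | 0, _ => [[]]
  | k + 1, E => E.flatMap (fun x => (pvAll k E).map (fun l => x :: l))

theorem pvAll_length {α : Type} (E : List α) : ∀ k, (pvAll k E).length = E.length ^ k := by
  intro k
  induction k with
  | zero => rfl
  | succ k ih =>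
    show (E.flatMap (fun x => (pvAll k E).map (fun l => x :: l))).length = E.length ^ (k + 1)
    rw [List.length_flatMap]
    have : (E.map fun x => ((pvAll k E).map (fun l => x :: l)).length)
        = E.map (fun _ => E.length ^ k) := by
      refine List.map_congr_left ?_
      intro x _; rw [List.length_map, ih]
    rw [this, List.map_const', List.sum_replicate, smul_eq_mul, pow_succ, Nat.mul_comm]

theorem pvAll_mem {α : Type} (E : List α) :
    ∀ (k : Nat) (l : List α), l.length = k → (∀ x ∈ l, x ∈ E) → l ∈ pvAll k E := by
  intro k
  induction k with
  | zero =>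
    intro l hl _
    rw [List.length_eq_zero_iff] at hl
    subst hl; simp [pvAll]
  | succ k ih =>
    intro l hl hx
    cases l with
    | nil => simp at hl
    | cons x xs =>
      show x :: xs ∈ E.flatMap (fun x => (pvAll k E).map (fun l => x :: l))
      rw [List.mem_flatMap]
      refine ⟨x, hx x (by simp), ?_⟩
      rw [List.mem_map]
      exact ⟨xs, ih xs (by simpa using hl) (fun y hy => hx y (by simp [hy])), rfl⟩

-- ---------- existence of a repeat (pigeonhole) ----------

theorem pvStops_exists_le {s0 : List (List String)} (h1 : 0 < s0.length)
    (h2 : 0 < (s0.headD []).length)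
    (h3 : ∀ row ∈ s0, (s0.headD []).length ≤ row.length) :
    ∃ k ≤ (("" :: s0.flatten).length ^ (s0.headD []).length) ^ s0.length + 1,
      pvStops s0 k := by
  set E := "" :: s0.flatten with hE
  set m := s0.length with hm
  set n0 := (s0.headD []).length with hn0
  set NA := (E.length ^ n0) ^ m + 1 with hNA
  have h0E : "" ∈ E := by simp [hE]
  have hent : ∀ k, pvEntP E (pvSeq s0 k) := by
    intro k
    induction k with
    | zero =>
      intro row hrow x hx
      simp only [hE, List.mem_cons]
      right
      exact List.mem_flatten.2 ⟨row, hrow, hx⟩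
    | succ k ih => exact pvEntP_cycle ih h0E
  have hrect : ∀ k, 1 ≤ k → pvRectP (pvSeq s0 k) m n0 := by
    intro k
    induction k with
    | zero => omega
    | succ k ih =>
      intro _
      cases Nat.eq_zero_or_pos k with
      | inl h => subst h; exact pvCycle_first_rect h1 h2 h3
      | inr h => exact pvRectP_cycle (ih h) h1 h2
  have hmem : ∀ k, pvSeq s0 k ∈ s0 :: pvAll m (pvAll n0 E) := by
    intro k
    cases Nat.eq_zero_or_pos k with
    | inl h => subst h; simp [pvSeq]
    | inr h =>
      simp only [List.mem_cons]
      right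
      have hr := hrect k h
      refine pvAll_mem _ m _ (pvRectP_length hr) ?_
      intro row hrow
      refine pvAll_mem _ n0 _ ?_ (fun x hx => hent k row hrow x hx)
      have : row.length ∈ (pvSeq s0 k).map List.length := List.mem_map_of_mem hrow
      rw [hr] at this
      exact List.eq_of_mem_replicate this
  by_contra hcon
  push_neg at hcon
  have hnost : ∀ j < NA + 1, ¬ pvStops s0 j := by
    intro j hj hst
    exact hcon j (by omega) hst
  have hnd : (pvPs s0 (NA + 1)).Nodup := pvPs_nodup s0 _ hnost
  have hsub : ∀ x ∈ pvPs s0 (NA + 1), x ∈ s0 :: pvAll m (pvAll n0 E) := by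
    intro x hx
    rcases List.mem_map.1 hx with ⟨j, _, rfl⟩
    exact hmem j
  have hc1 : (pvPs s0 (NA + 1)).toFinset.card = NA + 1 := by
    rw [List.toFinset_card_of_nodup hnd, pvPs_length]
  have hc2 : (pvPs s0 (NA + 1)).toFinset ⊆ (s0 :: pvAll m (pvAll n0 E)).toFinset := by
    intro x hx
    rw [List.mem_toFinset] at hx ⊢
    exact hsub x hx
  have hc3 : (s0 :: pvAll m (pvAll n0 E)).toFinset.card ≤ NA := by
    calc (s0 :: pvAll m (pvAll n0 E)).toFinset.card
        ≤ (s0 :: pvAll m (pvAll n0 E)).length := List.toFinset_card_le _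
      _ = (pvAll m (pvAll n0 E)).length + 1 := by simp
      _ = NA := by rw [pvAll_length, pvAll_length, hNA]
  have := Finset.card_le_card hc2
  omega

-- ---------- L, base, and their properties ----------

def pvL (s0 : List (List String)) (hex : ∃ k, pvStops s0 k) : Nat :=
  @Nat.find _ (pvStopsDec s0) hex

def pvB (s0 : List (List String)) (hex : ∃ k, pvStops s0 k) : Nat :=
  Nat.find (⟨pvL s0 hex, rfl⟩ : ∃ j, pvSeq s0 j = pvSeq s0 (pvL s0 hex))

theorem pvL_stops (s0 : List (List String)) (hex : ∃ k, pvStops s0 k) :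
    pvStops s0 (pvL s0 hex) := @Nat.find_spec _ (pvStopsDec s0) hex

theorem pvL_min (s0 : List (List String)) (hex : ∃ k, pvStops s0 k) :
    ∀ k < pvL s0 hex, ¬ pvStops s0 k :=
  fun k hk => @Nat.find_min _ (pvStopsDec s0) hex k hk

theorem pvB_eq (s0 : List (List String)) (hex : ∃ k, pvStops s0 k) :
    pvSeq s0 (pvB s0 hex) = pvSeq s0 (pvL s0 hex) :=
  Nat.find_spec (⟨pvL s0 hex, rfl⟩ : ∃ j, pvSeq s0 j = pvSeq s0 (pvL s0 hex))

theorem pvB_lt (s0 : List (List String)) (hex : ∃ k, pvStops s0 k) :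
    pvB s0 hex < pvL s0 hex := by
  have h := pvL_stops s0 hex
  unfold pvStops at h
  rcases List.mem_map.1 h with ⟨j, hj, hje⟩
  rw [List.mem_range] at hj
  have : pvB s0 hex ≤ j := Nat.find_min' _ hje
  omega

theorem pvSeq_per (s0 : List (List String)) (hex : ∃ k, pvStops s0 k) :
    ∀ t, pvSeq s0 (pvL s0 hex + t) = pvSeq s0 (pvB s0 hex + t) := by
  intro t
  induction t with
  | zero => simpa using (pvB_eq s0 hex).symm
  | succ t ih =>
    show pvSeq s0 (pvL s0 hex + t + 1) = pvSeq s0 (pvB s0 hex + t + 1)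
    show pvCycle (pvSeq s0 (pvL s0 hex + t)) = pvCycle (pvSeq s0 (pvB s0 hex + t))
    rw [ih]

theorem pvPsL_nodup (s0 : List (List String)) (hex : ∃ k, pvStops s0 k) :
    (pvPs s0 (pvL s0 hex)).Nodup :=
  pvPs_nodup s0 _ (pvL_min s0 hex)

-- ---------- list.index on a nodup list ----------

theorem pvIndex_of_nodup {α : Type} [DecidableEq α] [BEq α] [LawfulBEq α]
    (l : List α) (hnd : l.Nodup) (j : Nat) (hj : j < l.length) :
    PySem.List.index? l l[j] = some j := by
  rw [PySem.List.index?_eq_some_iff]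
  refine ⟨l.take j, l.drop (j + 1), ?_, ?_, ?_⟩
  · conv_lhs => rw [← List.take_append_drop j l]
    rw [List.drop_eq_getElem_cons hj]
  · rw [List.length_take]; omega
  · intro hmem
    obtain ⟨i, hi, hie⟩ := List.getElem_of_mem hmem
    rw [List.getElem_take] at hie
    have hij : i < j := by rw [List.length_take] at hi; omega
    have := (List.Nodup.getElem_inj_iff hnd).1 hie
    omega


-- ---------- loop 1 (A): collect states until the first repeat ----------

theorem pvLoop1_run (s0 : List (List String)) (hex : ∃ k, pvStops s0 k) :
    ∀ (f k : Nat), k ≤ pvL s0 hex → pvL s0 hex < k + f →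
      pvLoop1 f (pvPs s0 k) (pvSeq s0 k) = (pvPs s0 (pvL s0 hex), pvSeq s0 (pvL s0 hex)) := by
  intro f
  induction f with
  | zero => intro k hk hf; omega
  | succ f ih =>
    intro k hk hf
    show (if pvSeq s0 k ∈ pvPs s0 k then (pvPs s0 k, pvSeq s0 k)
      else pvLoop1 f (pvPs s0 k ++ [pvSeq s0 k]) (pvCycle (pvSeq s0 k))) = _
    by_cases hkL : k = pvL s0 hex
    · subst hkL
      have hmem : pvSeq s0 (pvL s0 hex) ∈ pvPs s0 (pvL s0 hex) := pvL_stops s0 hex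
      rw [if_pos hmem]
    · have hklt : k < pvL s0 hex := by omega
      have hmem : pvSeq s0 k ∉ pvPs s0 k := pvL_min s0 hex k hklt
      rw [if_neg hmem]
      rw [← pvPs_succ]
      show pvLoop1 f (pvPs s0 (k + 1)) (pvSeq s0 (k + 1)) = _
      exact ih (k + 1) (by omega) (by omega)

-- ---------- the seen-dict of B ----------

def pvSeen (s0 : List (List String)) (k : Nat) : PySem.Dict (List (List String)) Int :=
  (List.range k).foldl (fun d j => d.insert (pvSeq s0 j) (j : Int)) PySem.Dict.empty

theorem pvSeen_succ (s0 : List (List String)) (k : Nat) :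
    pvSeen s0 (k + 1) = (pvSeen s0 k).insert (pvSeq s0 k) (k : Int) := by
  unfold pvSeen
  rw [List.range_succ, List.foldl_append]
  rfl

theorem pvSeen_get?_none (s0 : List (List String)) :
    ∀ (k : Nat) (v : List (List String)), (∀ j < k, pvSeq s0 j ≠ v) →
      (pvSeen s0 k).get? v = none := by
  intro k
  induction k with
  | zero => intro v _; exact PySem.Dict.get?_empty ..
  | succ k ih =>
    intro v hv
    have hne : v ≠ pvSeq s0 k := fun h => hv k (by omega) h.symm
    rw [pvSeen_succ, PySem.Dict.get?_insert_of_ne _ _ hne]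
    exact ih v (fun j hj => hv j (by omega))

theorem pvSeen_get?_base (s0 : List (List String)) (hex : ∃ k, pvStops s0 k) :
    ∀ k, pvB s0 hex < k → k ≤ pvL s0 hex →
      (pvSeen s0 k).get? (pvSeq s0 (pvL s0 hex)) = some ((pvB s0 hex : Nat) : Int) := by
  intro k
  induction k with
  | zero => intro h _; omega
  | succ k ih =>
    intro hBk hkL
    rw [pvSeen_succ]
    by_cases hkB : k = pvB s0 hex
    · subst hkB
      rw [pvB_eq s0 hex, PySem.Dict.get?_insert_self]
    · have hBk' : pvB s0 hex < k := by omega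
      have hkL' : k < pvL s0 hex := by omega
      have hne : pvSeq s0 (pvL s0 hex) ≠ pvSeq s0 k := by
        intro h
        apply pvL_min s0 hex k hkL'
        unfold pvStops pvPs
        rw [List.mem_map]
        refine ⟨pvB s0 hex, by rw [List.mem_range]; omega, ?_⟩
        rw [pvB_eq s0 hex, h]
      rw [PySem.Dict.get?_insert_of_ne _ _ hne]
      exact ih hBk' (by omega)

-- ---------- loop of B: one pass with the seen-dict ----------

theorem pvLoopB_run (s0 : List (List String)) (cycles : Int) (hex : ∃ k, pvStops s0 k) :
    ∀ (f k : Nat), k ≤ pvL s0 hex → pvL s0 hex < k + f →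
      pvLoopB cycles f (pvSeen s0 k) (pvPs s0 k) (k : Int) (pvSeq s0 k) =
        (PySem.List.pyGet? (pvPs s0 (pvL s0 hex))
          (((pvB s0 hex : Nat) : Int) + PySem.Int.mod (cycles - ((pvB s0 hex : Nat) : Int))
            (((pvL s0 hex : Nat) : Int) - ((pvB s0 hex : Nat) : Int)))).getD [] := by
  intro f
  induction f with
  | zero => intro k hk hf; omega
  | succ f ih =>
    intro k hk hf
    show (match (pvSeen s0 k).get? (pvSeq s0 k) with
      | some base => (PySem.List.pyGet? (pvPs s0 k)
          (base + PySem.Int.mod (cycles - base) ((k : Int) - base))).getD []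
      | none => pvLoopB cycles f ((pvSeen s0 k).insert (pvSeq s0 k) (k : Int))
          (pvPs s0 k ++ [pvSeq s0 k]) ((k : Int) + 1) (pvCycle (pvSeq s0 k))) = _
    by_cases hkL : k = pvL s0 hex
    · subst hkL
      rw [pvSeen_get?_base s0 hex _ (pvB_lt s0 hex) (le_refl _)]
    · have hklt : k < pvL s0 hex := by omega
      have hnone : (pvSeen s0 k).get? (pvSeq s0 k) = none := by
        apply pvSeen_get?_none
        intro j hj h
        apply pvL_min s0 hex k hklt
        unfold pvStops pvPs
        rw [List.mem_map]
        exact ⟨j, by rw [List.mem_range]; omega, h⟩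
      rw [hnone]
      rw [← pvSeen_succ, ← pvPs_succ,
        show ((k : Int) + 1 = ((k + 1 : Nat) : Int)) by push_cast; ring]
      show pvLoopB cycles f (pvSeen s0 (k + 1)) (pvPs s0 (k + 1)) ((k + 1 : Nat) : Int)
        (pvSeq s0 (k + 1)) = _
      exact ih (k + 1) (by omega) (by omega)

-- ---------- loop 2 (A): the index-counting loop ----------

def pvIdx0 (s0 : List (List String)) (hex : ∃ k, pvStops s0 k) : List Int :=
  (List.range (pvL s0 hex)).map (fun i : Nat => (i : Int))

def pvIdxT (s0 : List (List String)) (hex : ∃ k, pvStops s0 k) (t : Nat) : List Int :=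
  pvIdx0 s0 hex ++ (List.range t).map (fun u => ((pvB s0 hex + u : Nat) : Int))

def pvIdxF (s0 : List (List String)) (hex : ∃ k, pvStops s0 k) : List Int :=
  pvIdxT s0 hex (pvL s0 hex - pvB s0 hex) ++ [((pvB s0 hex : Nat) : Int)]

theorem pvIdx0_nodup (s0 : List (List String)) (hex : ∃ k, pvStops s0 k) :
    (pvIdx0 s0 hex).Nodup := by
  unfold pvIdx0
  exact (List.nodup_range).map (fun a b h => by exact_mod_cast h)

theorem pvIdx0_mem_iff (s0 : List (List String)) (hex : ∃ k, pvStops s0 k) (j : Nat) :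
    ((j : Int) ∈ pvIdx0 s0 hex) ↔ j < pvL s0 hex := by
  unfold pvIdx0
  constructor
  · intro h
    rcases List.mem_map.1 h with ⟨i, hi, hie⟩
    rw [List.mem_range] at hi
    have : i = j := by exact_mod_cast hie
    omega
  · intro h
    exact List.mem_map.2 ⟨j, List.mem_range.2 h, rfl⟩

theorem pvIdx0_count (s0 : List (List String)) (hex : ∃ k, pvStops s0 k) (j : Nat)
    (hj : j < pvL s0 hex) : (pvIdx0 s0 hex).count ((j : Nat) : Int) = 1 :=
  List.count_eq_one_of_mem (pvIdx0_nodup s0 hex) ((pvIdx0_mem_iff s0 hex j).2 hj)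

theorem pvMapB_nodup (s0 : List (List String)) (hex : ∃ k, pvStops s0 k) (t : Nat) :
    ((List.range t).map (fun u => ((pvB s0 hex + u : Nat) : Int))).Nodup :=
  (List.nodup_range).map (fun a b h => by
    have : pvB s0 hex + a = pvB s0 hex + b := by exact_mod_cast h
    omega)

theorem pvMapB_mem_iff (s0 : List (List String)) (hex : ∃ k, pvStops s0 k) (t j : Nat) :
    (((j : Nat) : Int) ∈ (List.range t).map (fun u => ((pvB s0 hex + u : Nat) : Int))) ↔
      (pvB s0 hex ≤ j ∧ j < pvB s0 hex + t) := by
  constructor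
  · intro h
    rcases List.mem_map.1 h with ⟨u, hu, hue⟩
    rw [List.mem_range] at hu
    have : pvB s0 hex + u = j := by exact_mod_cast hue
    omega
  · intro h
    refine List.mem_map.2 ⟨j - pvB s0 hex, List.mem_range.2 (by omega), ?_⟩
    congr 1
    omega

theorem pvIdxT_count (s0 : List (List String)) (hex : ∃ k, pvStops s0 k) (t j : Nat)
    (hjL : j < pvL s0 hex) (hjB : pvB s0 hex ≤ j) (hjt : j < pvB s0 hex + t) :
    (pvIdxT s0 hex t).count ((j : Nat) : Int) = 2 := by
  unfold pvIdxT
  rw [List.count_append, pvIdx0_count s0 hex j hjL,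
    List.count_eq_one_of_mem (pvMapB_nodup s0 hex t) ((pvMapB_mem_iff s0 hex t j).2 ⟨hjB, hjt⟩)]

theorem pvIdxT_getLastD (s0 : List (List String)) (hex : ∃ k, pvStops s0 k) (t : Nat)
    (ht : 1 ≤ t) :
    (pvIdxT s0 hex t).getLastD 0 = ((pvB s0 hex + (t - 1) : Nat) : Int) := by
  unfold pvIdxT
  obtain ⟨t', rfl⟩ : ∃ t', t = t' + 1 := ⟨t - 1, by omega⟩
  rw [List.range_succ, List.map_append, ← List.append_assoc]
  simp

-- appending one more index
theorem pvIdxT_snoc (s0 : List (List String)) (hex : ∃ k, pvStops s0 k) (t : Nat) :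
    pvIdxT s0 hex t ++ [((pvB s0 hex + t : Nat) : Int)] = pvIdxT s0 hex (t + 1) := by
  unfold pvIdxT
  rw [List.range_succ, List.map_append, ← List.append_assoc]
  rfl

theorem pvPsL_getElem (s0 : List (List String)) (hex : ∃ k, pvStops s0 k) (j : Nat)
    (hj : j < pvL s0 hex) :
    (pvPs s0 (pvL s0 hex))[j]'(by rw [pvPs_length]; exact hj) = pvSeq s0 j := by
  unfold pvPs
  simp

theorem pvIndexL (s0 : List (List String)) (hex : ∃ k, pvStops s0 k) (j : Nat)
    (hj : j < pvL s0 hex) :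
    PySem.List.index? (pvPs s0 (pvL s0 hex)) (pvSeq s0 j) = some j := by
  have h := pvIndex_of_nodup (pvPs s0 (pvL s0 hex)) (pvPsL_nodup s0 hex) j
    (by rw [pvPs_length]; exact hj)
  rwa [pvPsL_getElem s0 hex j hj] at h

theorem pvLoop2_stop (s0 : List (List String)) (hex : ∃ k, pvStops s0 k)
    (f : Nat) (s' : List (List String)) :
    pvLoop2 (f + 1) (pvPs s0 (pvL s0 hex)) (pvIdxF s0 hex) s' = pvIdxF s0 hex := by
  have hB : pvB s0 hex < pvL s0 hex := pvB_lt s0 hex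
  have hlast : (pvIdxF s0 hex).getLastD 0 = ((pvB s0 hex : Nat) : Int) := by
    unfold pvIdxF
    simp
  have hcount : PySem.List.count (pvIdxF s0 hex) (((pvB s0 hex : Nat) : Int)) = 3 := by
    rw [PySem.List.count_eq]
    unfold pvIdxF pvIdxT
    rw [List.count_append, List.count_append, pvIdx0_count s0 hex _ hB,
      List.count_eq_one_of_mem (pvMapB_nodup s0 hex _)
        ((pvMapB_mem_iff s0 hex _ _).2 ⟨le_refl _, by omega⟩)]
    simp
  show (if PySem.List.count (pvIdxF s0 hex) ((pvIdxF s0 hex).getLastD 0) ≠ 3 then _ else pvIdxF s0 hex) = pvIdxF s0 hex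
  rw [hlast, hcount]
  simp

theorem pvLoop2_run (s0 : List (List String)) (hex : ∃ k, pvStops s0 k) :
    ∀ (f t : Nat), t ≤ pvL s0 hex - pvB s0 hex →
      pvL s0 hex - pvB s0 hex + 2 ≤ t + f →
      pvLoop2 f (pvPs s0 (pvL s0 hex)) (pvIdxT s0 hex t) (pvSeq s0 (pvL s0 hex + t)) =
        pvIdxF s0 hex := by
  have hB : pvB s0 hex < pvL s0 hex := pvB_lt s0 hex
  intro f
  induction f with
  | zero => intro t ht hf; omega
  | succ f ih =>
    intro t ht hf
    set lam := pvL s0 hex - pvB s0 hex with hlam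
    have hcount_ne : PySem.List.count (pvIdxT s0 hex t) ((pvIdxT s0 hex t).getLastD 0) ≠ 3 := by
      rw [PySem.List.count_eq]
      by_cases ht0 : t = 0
      · subst ht0
        have h0 : pvIdxT s0 hex 0 = pvIdx0 s0 hex := by
          unfold pvIdxT; simp
        rw [h0]
        obtain ⟨L', hL'⟩ : ∃ L', pvL s0 hex = L' + 1 := ⟨pvL s0 hex - 1, by omega⟩
        have hlast : (pvIdx0 s0 hex).getLastD 0 = ((L' : Nat) : Int) := by
          unfold pvIdx0
          rw [hL', List.range_succ, List.map_append]
          simp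
        rw [hlast, pvIdx0_count s0 hex L' (by omega)]
        omega
      · rw [pvIdxT_getLastD s0 hex t (by omega),
          pvIdxT_count s0 hex t _ (by omega) (by omega) (by omega)]
        omega
    show (if PySem.List.count (pvIdxT s0 hex t) ((pvIdxT s0 hex t).getLastD 0) ≠ 3 then
        pvLoop2 f (pvPs s0 (pvL s0 hex)) (pvIdxT s0 hex t ++
          [(((PySem.List.index? (pvPs s0 (pvL s0 hex)) (pvSeq s0 (pvL s0 hex + t))).getD 0 : Nat) : Int)])
          (pvCycle (pvSeq s0 (pvL s0 hex + t)))
      else pvIdxT s0 hex t) = pvIdxF s0 hex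
    rw [if_pos hcount_ne]
    have hper := pvSeq_per s0 hex t
    by_cases htl : t < lam
    · have hidx : PySem.List.index? (pvPs s0 (pvL s0 hex)) (pvSeq s0 (pvL s0 hex + t)) =
          some (pvB s0 hex + t) := by
        rw [hper]
        exact pvIndexL s0 hex _ (by omega)
      rw [hidx]
      show pvLoop2 f _ (pvIdxT s0 hex t ++ [((pvB s0 hex + t : Nat) : Int)])
        (pvCycle (pvSeq s0 (pvL s0 hex + t))) = _
      rw [pvIdxT_snoc]
      show pvLoop2 f _ (pvIdxT s0 hex (t + 1)) (pvSeq s0 (pvL s0 hex + t + 1)) = _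
      rw [show pvL s0 hex + t + 1 = pvL s0 hex + (t + 1) by omega]
      exact ih (t + 1) (by omega) (by omega)
    · have htlam : t = lam := by omega
      subst htlam
      have hseq : pvSeq s0 (pvL s0 hex + lam) = pvSeq s0 (pvL s0 hex) := by
        rw [hper]
        congr 1
        omega
      have hidx : PySem.List.index? (pvPs s0 (pvL s0 hex)) (pvSeq s0 (pvL s0 hex + lam)) =
          some (pvB s0 hex) := by
        rw [hseq, ← pvB_eq s0 hex]
        exact pvIndexL s0 hex _ hB
      rw [hidx]
      show pvLoop2 f _ (pvIdxT s0 hex lam ++ [((pvB s0 hex : Nat) : Int)]) _ = _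
      rw [show (pvIdxT s0 hex lam ++ [((pvB s0 hex : Nat) : Int)]) = pvIdxF s0 hex from rfl]
      obtain ⟨f', rfl⟩ : ∃ f', f = f' + 1 := ⟨f - 1, by omega⟩
      exact pvLoop2_stop s0 hex f' _

theorem pvL_le (s0 : List (List String)) (h1 : 0 < s0.length)
    (h2 : 0 < (s0.headD []).length)
    (h3 : ∀ row ∈ s0, (s0.headD []).length ≤ row.length) (hex : ∃ k, pvStops s0 k) :
    pvL s0 hex ≤ (("" :: s0.flatten).length ^ (s0.headD []).length) ^ s0.length + 1 := by
  obtain ⟨k, hk, hst⟩ := pvStops_exists_le h1 h2 h3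
  exact le_trans (@Nat.find_min' _ (pvStopsDec s0) hex k hst) hk

-- ===== VERDICT (by name: the statement is the Claim_ definition above) =====
theorem get_platform_spec : Claim_equal_get_platform := by
  unfold Claim_equal_get_platform
  intro platform cycles _ hpre
  unfold Spec_get_platform
  obtain ⟨h1, h2, h3⟩ := hpre
  have hex : ∃ k, pvStops platform k := by
    obtain ⟨k, _, hst⟩ := pvStops_exists_le h1 h2 h3
    exact ⟨k, hst⟩
  have hBL : pvB platform hex < pvL platform hex := pvB_lt platform hex
  have hLle := pvL_le platform h1 h2 h3 hex
  have hfuel : pvFuel platform =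
      (("" :: platform.flatten).length ^ (platform.headD []).length) ^ platform.length + 3 := rfl
  have hRHS : get_platform_alt platform cycles =
      (PySem.List.pyGet? (pvPs platform (pvL platform hex))
        (((pvB platform hex : Nat) : Int) +
          PySem.Int.mod (cycles - ((pvB platform hex : Nat) : Int))
            (((pvL platform hex : Nat) : Int) - ((pvB platform hex : Nat) : Int)))).getD [] := by
    unfold get_platform_alt
    exact pvLoopB_run platform cycles hex (pvFuel platform) 0 (by omega) (by rw [hfuel]; omega)
  have hloop1 := pvLoop1_run platform hex (pvFuel platform) 0 (by omega) (by rw [hfuel]; omega)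
  have hT0 : pvIdxT platform hex 0 = pvIdx0 platform hex := by
    unfold pvIdxT
    simp
  have hloop2 := pvLoop2_run platform hex (pvFuel platform) 0 (by omega) (by rw [hfuel]; omega)
  rw [hT0] at hloop2
  simp only [Nat.add_zero] at hloop2
  have hloop1' : pvLoop1 (pvFuel platform) [] platform =
      (pvPs platform (pvL platform hex), pvSeq platform (pvL platform hex)) := hloop1
  simp only [get_platform, hloop1']
  have hidx0 : (List.range (pvPs platform (pvL platform hex)).length).map
      (fun i : Nat => (i : Int)) = pvIdx0 platform hex := by
    rw [pvPs_length]
    rfl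
  rw [hidx0, hloop2, PySem.List.slice_to_neg_one]
  have hdrop : (pvIdxF platform hex).dropLast =
      pvIdxT platform hex (pvL platform hex - pvB platform hex) := by
    unfold pvIdxF
    exact List.dropLast_concat ..
  rw [hdrop]
  have hlen : ((pvIdxT platform hex (pvL platform hex - pvB platform hex)).length : Int) =
      ((pvL platform hex : Nat) : Int) + ((pvL platform hex - pvB platform hex : Nat) : Int) := by
    unfold pvIdxT pvIdx0
    push_cast [List.length_append, List.length_map, List.length_range]
    ring
  rw [hRHS, hlen, pvPs_length]
  have e3 : ((pvL platform hex : Nat) : Int) - ((pvB platform hex : Nat) : Int) =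
      ((pvL platform hex - pvB platform hex : Nat) : Int) := by
    rw [Nat.cast_sub (le_of_lt hBL)]
  rw [e3]
  have e1 : ((pvL platform hex : Nat) : Int) +
      ((pvL platform hex - pvB platform hex : Nat) : Int) -
      ((pvL platform hex : Nat) : Int) = ((pvL platform hex - pvB platform hex : Nat) : Int) := by
    ring
  rw [e1]
  have e2 : ((pvL platform hex : Nat) : Int) -
      ((pvL platform hex - pvB platform hex : Nat) : Int) = ((pvB platform hex : Nat) : Int) := by
    rw [Nat.cast_sub (le_of_lt hBL)]
    ring
  rw [e2, add_comm (PySem.Int.mod (cycles - ((pvB platform hex : Nat) : Int))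
    ((pvL platform hex - pvB platform hex : Nat) : Int)) (((pvB platform hex : Nat) : Int))]
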